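-- pv_equiv track=rewrite | github.com/exasol-labs/exasol-json-tables | python/exasol_json_tables/preprocessor_library_builder.py | compact_lua_body
-- ===== SOURCE A (Python) =====
-- def compact_lua_body(body: str) -> str:
--     compact_lines: list[str] = []
--     last_blank = False
--     for line in body.splitlines():
--         stripped = line.strip()
--         if stripped.startswith("--"):
--             continue
--         if stripped == "":
--             if last_blank:
--                 continue
--             last_blank = True
--             compact_lines.append("")
--             continue
--         last_blank = False
--         compact_lines.append(stripped)
--     return "\n".join(compact_lines).strip() + "\n"
-- ===== SOURCE B (Python) =====
-- def _paragraphs(lines):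
--     if not lines:
--         return []
--     if lines[0] == "":
--         return _paragraphs(lines[1:])
--     n = lines.index("") if "" in lines else len(lines)
--     return ["\n".join(lines[:n])] + _paragraphs(lines[n:])
--
--
-- def compact_lua_body(body: str) -> str:
--     kept = [s for s in (line.strip() for line in body.splitlines()) if not s.startswith("--")]
--     return "\n\n".join(_paragraphs(kept)) + "\n"
-- ===== Notes on version B (the rewrite author's own statement) =====
-- stated objective: alternative
-- what changed: Replaces A's single stateful loop (last_blank flag, blank lines emitted into the output and removed again by a final strip) with a two-stage design: a filtering pass keeps the stripped non-comment lines, then a recursive helper splits that list at the first blank line into paragraphs, which are joined with a double-newline separator, so no blank lines are ever emitted and no final strip is needed.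
import Mathlib
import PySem

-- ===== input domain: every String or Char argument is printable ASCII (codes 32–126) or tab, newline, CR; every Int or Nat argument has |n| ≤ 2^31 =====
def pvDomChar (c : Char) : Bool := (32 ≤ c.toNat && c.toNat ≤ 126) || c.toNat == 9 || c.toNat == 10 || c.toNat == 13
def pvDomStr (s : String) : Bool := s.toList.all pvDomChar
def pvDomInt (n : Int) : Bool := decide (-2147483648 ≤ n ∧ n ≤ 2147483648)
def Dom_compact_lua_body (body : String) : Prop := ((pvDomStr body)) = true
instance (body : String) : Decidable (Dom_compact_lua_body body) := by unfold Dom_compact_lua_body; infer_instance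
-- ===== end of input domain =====

-- B filters comments, then recursively splits the kept lines at the first blank into
-- paragraphs and joins them with "\n\n" — no blank-collapsing flag and no final strip
-- (alternative decomposition; same cost).

-- ===== PORT A =====
def compact_lua_body (body : String) : String :=
  let st := (PySem.Str.splitlines body).foldl
    (fun (st : List String × Bool) line =>
      let stripped := PySem.Str.strip line
      if PySem.Str.startswith stripped "--" then st
      else if stripped = "" then
        if st.2 then st else (st.1 ++ [""], true)
      else (st.1 ++ [stripped], false))
    ([], false)
  PySem.Str.strip (PySem.Str.join "\n" st.1) ++ "\n"

-- ===== PORT B =====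
-- termination helper for pvParagraphs (cited by its decreasing_by)
theorem pvIndexPos (l : String) (rest : List String) (h : ¬ l = "") :
    1 ≤ (if "" ∈ (l :: rest) then (PySem.List.index? (l :: rest) "").getD 0 else (l :: rest).length) := by
  split
  · next hm =>
      have hr : "" ∈ rest := by
        cases hm with
        | head => exact absurd rfl h
        | tail _ hm => exact hm
      have he : PySem.List.index? (l :: rest) "" = (PySem.List.index? rest "").map (· + 1) :=
        PySem.List.index?_cons_of_ne _ (fun hc => h hc)
      obtain ⟨m, hmm⟩ := Option.isSome_iff_exists.mp
        ((PySem.List.index?_isSome_iff rest "").mpr hr)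
      rw [he, hmm]
      simp
  · simp

-- recursive paragraph extraction (Source B's _paragraphs); lines[:n]/lines[n:] are ported as
-- take/drop, exact here since n is a nonnegative index
def pvParagraphs (lines : List String) : List String :=
  match lines with
  | [] => []
  | l :: rest =>
    if h : l = "" then pvParagraphs rest
    else
      let n : Nat := if "" ∈ (l :: rest) then (PySem.List.index? (l :: rest) "").getD 0 else (l :: rest).length
      PySem.Str.join "\n" ((l :: rest).take n) :: pvParagraphs ((l :: rest).drop n)
termination_by lines.length
decreasing_by
  · simp
  · have h1 : 1 ≤ n := pvIndexPos l rest h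
    show (List.drop n (l :: rest)).length < (l :: rest).length
    rw [List.length_drop]
    simp only [List.length_cons]
    omega

def compact_lua_body_alt (body : String) : String :=
  let kept := ((PySem.Str.splitlines body).map PySem.Str.strip).filter
    (fun s => !(PySem.Str.startswith s "--"))
  PySem.Str.join "\n\n" (pvParagraphs kept) ++ "\n"

-- ===== PRECONDITION & SPEC =====
def Spec_compact_lua_body (body : String) (out : String) : Prop := out = compact_lua_body_alt body
instance (body : String) (out : String) : Decidable (Spec_compact_lua_body body out) := by unfold Spec_compact_lua_body; infer_instance

-- ===== CLAIM (what is proved, stated in full; the proofs are below) =====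
def Claim_equal_compact_lua_body : Prop := ∀ (body : String), Dom_compact_lua_body body → Spec_compact_lua_body body (compact_lua_body body)

-- ===== LEMMAS AND PROOFS =====

-- A's loop body restricted to the kept (stripped, non-comment) lines.
def pvStep (st : List String × Bool) (l : String) : List String × Bool :=
  if l = "" then (if st.2 then st else (st.1 ++ [""], true))
  else (st.1 ++ [l], false)

-- A's collapsed line list, as structural recursion with the previous line carried along.
def pvCollapse (prev : Option String) : List String → List String
  | [] => []
  | c :: rest => (if c ≠ "" ∨ prev ≠ some "" then [c] else []) ++ pvCollapse (some c) rest

-- A's fold over raw lines = the restricted fold over stripped non-comment lines.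
theorem pvFoldA (lines : List String) (st : List String × Bool) :
    lines.foldl
      (fun (st : List String × Bool) line =>
        let stripped := PySem.Str.strip line
        if PySem.Str.startswith stripped "--" then st
        else if stripped = "" then
          if st.2 then st else (st.1 ++ [""], true)
        else (st.1 ++ [stripped], false)) st
    = ((lines.map PySem.Str.strip).filter
        (fun l => !(PySem.Str.startswith l "--"))).foldl pvStep st := by
  induction lines generalizing st with
  | nil => rfl
  | cons l ls ih =>
      simp only [List.map_cons, List.filter_cons, List.foldl_cons]
      by_cases h : PySem.Str.startswith (PySem.Str.strip l) "--" = true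
      · simp only [h, Bool.not_true, Bool.false_eq_true, if_false, if_true]
        exact ih st
      · have hf : PySem.Str.startswith (PySem.Str.strip l) "--" = false := by
          simpa using h
        simp only [hf, Bool.not_false, Bool.false_eq_true, if_false, if_true,
          List.foldl_cons, pvStep]
        exact ih _

-- The restricted fold computes pvCollapse.
theorem pvFoldCollapse (kept : List String) (acc : List String) (prev : Option String) :
    (kept.foldl pvStep (acc, prev == some "")).1 = acc ++ pvCollapse prev kept := by
  induction kept generalizing acc prev with
  | nil => simp [pvCollapse]
  | cons c rest ih =>
      simp only [List.foldl_cons]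
      by_cases hc : c = ""
      · subst hc
        by_cases hp : prev = some ""
        · have h1 : pvStep (acc, prev == some "") "" = (acc, prev == some "") := by
            simp [pvStep, hp]
          rw [h1, ih acc prev]
          simp [pvCollapse, hp]
        · have h1 : pvStep (acc, prev == some "") ""
              = (acc ++ [""], ((some "" : Option String) == some "")) := by
            simp [pvStep, hp]
          rw [h1, ih (acc ++ [""]) (some "")]
          simp [pvCollapse, hp]
      · have h1 : pvStep (acc, prev == some "") c
            = (acc ++ [c], ((some c : Option String) == some "")) := by
          simp [pvStep, hc]
        rw [h1, ih (acc ++ [c]) (some c)]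
        simp [pvCollapse, hc]

-- pvCollapse ignores a non-blank (or absent) previous line.
theorem pvCollapse_good (t : List String) (p : Option String) (hp : p ≠ some "") :
    pvCollapse p t = pvCollapse none t := by
  cases t with
  | nil => rfl
  | cons c rest => simp [pvCollapse, hp]

-- after a blank, further blanks are skipped until the first non-blank line.
theorem pvCollapse_blank (t : List String) :
    pvCollapse (some "") t = pvCollapse none (t.dropWhile (· == "")) := by
  induction t with
  | nil => rfl
  | cons c rest ih =>
      by_cases hc : c = ""
      · subst hc
        simp only [pvCollapse, List.dropWhile_cons]
        simpa using ih
      · simp [pvCollapse, hc]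

-- a block of non-blank lines passes through pvCollapse unchanged.
theorem pvCollapse_block : ∀ (B t : List String), (∀ x ∈ B, x ≠ "") →
    pvCollapse none (B ++ t) = B ++ pvCollapse none t
  | [], _, _ => rfl
  | b :: B', t, hB => by
      have hb : b ≠ "" := hB b (by simp)
      simp only [List.cons_append, pvCollapse]
      rw [pvCollapse_good (B' ++ t) (some b) (by simpa using hb),
        pvCollapse_block B' t (fun x hx => hB x (by simp [hx]))]
      simp [hb]

-- pvParagraphs ignores leading blank lines.
theorem pvParagraphs_dropWhile (t : List String) :
    pvParagraphs (t.dropWhile (· == "")) = pvParagraphs t := by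
  induction t with
  | nil => rfl
  | cons c rest ih =>
      by_cases hc : c = ""
      · subst hc
        simp only [List.dropWhile_cons]
        rw [pvParagraphs]
        simp [ih]
      · simp [hc]

-- characters: a stripped non-empty string starts and ends with non-whitespace
theorem pvDropWhileHead {α : Type} (p : α → Bool) (l : List α) (c : α) (x : List α)
    (h : l.dropWhile p = c :: x) : p c = false := by
  have hne : l.dropWhile p ≠ [] := by simp [h]
  have h5 := List.head_dropWhile_not p hne
  have h6 : (l.dropWhile p).head hne = c := by
    apply Option.some_inj.mp
    rw [← List.head?_eq_head hne, h]
    rfl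
  rwa [h6] at h5

theorem pvRstripLen (X : List Char) : (PySem.Chars.rstrip X).length ≤ X.length := by
  simp only [PySem.Chars.rstrip, List.length_reverse]
  calc (List.dropWhile PySem.Chars.isspace X.reverse).length
      ≤ X.reverse.length := List.length_dropWhile_le _ _
    _ = X.length := List.length_reverse

theorem pvStripHead (cs : List Char) (h : PySem.Chars.strip cs = cs) (c : Char) (t : List Char)
    (he : cs = c :: t) : PySem.Chars.isspace c = false := by
  by_contra hc
  have hc' : PySem.Chars.isspace c = true := by simpa using hc
  have h1 : PySem.Chars.lstrip cs = List.dropWhile PySem.Chars.isspace t := by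
    simp [PySem.Chars.lstrip, he, hc']
  have h2 : (PySem.Chars.strip cs).length ≤ t.length := by
    rw [PySem.Chars.strip, h1]
    calc (PySem.Chars.rstrip (List.dropWhile PySem.Chars.isspace t)).length
        ≤ (List.dropWhile PySem.Chars.isspace t).length := pvRstripLen _
      _ ≤ t.length := List.length_dropWhile_le _ _
  rw [h, he] at h2
  simp at h2

theorem pvStripLast (cs : List Char) (h : PySem.Chars.strip cs = cs) (s : List Char) (d : Char)
    (he : cs = s ++ [d]) : PySem.Chars.isspace d = false := by
  by_contra hc
  have hc' : PySem.Chars.isspace d = true := by simpa using hc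
  have hY : PySem.Chars.lstrip cs <:+ cs := List.dropWhile_suffix _
  obtain ⟨p, hp⟩ := hY
  have hne : PySem.Chars.lstrip cs ≠ [] := by
    intro h0
    have : PySem.Chars.strip cs = [] := by
      rw [PySem.Chars.strip, h0]; rfl
    rw [h, he] at this
    simp at this
  obtain ⟨s', hs'⟩ : ∃ s', PySem.Chars.lstrip cs = s' ++ [d] := by
    have hgl : (PySem.Chars.lstrip cs).getLast? = some d := by
      have h2 : (p ++ PySem.Chars.lstrip cs).getLast? = some d := by
        rw [hp, he]; exact List.getLast?_concat
      rwa [List.getLast?_append_of_ne_nil p hne] at h2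
    have h3 := List.dropLast_append_getLast hne
    rw [List.getLast?_eq_getLast hne] at hgl
    have h4 : (PySem.Chars.lstrip cs).getLast hne = d := Option.some_inj.mp hgl
    refine ⟨(PySem.Chars.lstrip cs).dropLast, ?_⟩
    rw [← h4]
    exact h3.symm
  have h2 : (PySem.Chars.strip cs).length < cs.length := by
    rw [PySem.Chars.strip, hs']
    have h3 : PySem.Chars.rstrip (s' ++ [d]) = (List.dropWhile PySem.Chars.isspace s'.reverse).reverse := by
      simp [PySem.Chars.rstrip, hc']
    rw [h3]
    have h4 : (s' ++ [d]).length ≤ cs.length := by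
      rw [← hs']
      have : (PySem.Chars.lstrip cs).length ≤ cs.length := List.length_dropWhile_le _ _
      exact this
    have h5 := List.length_dropWhile_le PySem.Chars.isspace s'.reverse
    simp only [List.length_reverse] at *
    simp only [List.length_append, List.length_singleton] at h4
    omega
  rw [h] at h2
  omega

theorem pvLstripHead (c : Char) (cs : List Char) (hc : PySem.Chars.isspace c = false) :
    PySem.Chars.lstrip (c :: cs) = c :: cs := by
  simp [PySem.Chars.lstrip, hc]

theorem pvRstripNl (x : List Char) : PySem.Chars.rstrip (x ++ ['\n']) = PySem.Chars.rstrip x := by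
  show (List.dropWhile PySem.Chars.isspace (x ++ ['\n']).reverse).reverse
      = (List.dropWhile PySem.Chars.isspace x.reverse).reverse
  rw [List.reverse_append]
  simp [(by decide : PySem.Chars.isspace '\n' = true)]

theorem pvRstripKeep (s : List Char) (d : Char) (hd : PySem.Chars.isspace d = false) :
    PySem.Chars.rstrip (s ++ [d]) = s ++ [d] := by
  simp [PySem.Chars.rstrip, hd]

theorem pvRstripPrefix (Y : List Char) : PySem.Chars.rstrip Y <+: Y := by
  rw [PySem.Chars.rstrip, ← List.reverse_reverse Y]
  exact List.reverse_prefix.mpr (by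
    rw [List.reverse_reverse]
    exact List.dropWhile_suffix _)

theorem pvStripIdem (cs : List Char) : PySem.Chars.strip (PySem.Chars.strip cs) = PySem.Chars.strip cs := by
  by_cases h0 : PySem.Chars.strip cs = []
  · rw [h0]; rfl
  · obtain ⟨c, t, hct⟩ := List.exists_cons_of_ne_nil h0
    have hpre : PySem.Chars.strip cs <+: PySem.Chars.lstrip cs := pvRstripPrefix _
    obtain ⟨r, hr⟩ := hpre
    have hhead : PySem.Chars.isspace c = false := by
      refine pvDropWhileHead PySem.Chars.isspace cs c (t ++ r) ?_
      have := hr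
      rw [hct] at this
      simpa [PySem.Chars.lstrip] using this.symm
    have hrs : PySem.Chars.strip cs
        = (List.dropWhile PySem.Chars.isspace (PySem.Chars.lstrip cs).reverse).reverse := rfl
    obtain ⟨z, zs, hzs⟩ := List.exists_cons_of_ne_nil
      (l := (PySem.Chars.strip cs).reverse) (by simpa using h0)
    have hlast : PySem.Chars.isspace z = false := by
      refine pvDropWhileHead PySem.Chars.isspace (PySem.Chars.lstrip cs).reverse z zs ?_
      rw [← hzs, hrs]
      simp
    have hsplit : PySem.Chars.strip cs = zs.reverse ++ [z] := by
      have := congrArg List.reverse hzs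
      simpa using this
    show PySem.Chars.rstrip (PySem.Chars.lstrip (PySem.Chars.strip cs)) = PySem.Chars.strip cs
    rw [hct, pvLstripHead c t hhead, ← hct, hsplit, pvRstripKeep _ _ hlast]

theorem pvStrStripIdem (s : String) : PySem.Str.strip (PySem.Str.strip s) = PySem.Str.strip s := by
  apply String.toList_inj.mp
  rw [PySem.Str.toList_strip, PySem.Str.toList_strip]
  exact pvStripIdem _

-- lstrip/rstrip structural facts
theorem pvRstripApp (s X : List Char) (c : Char) (t : List Char) (hX : X = c :: t)
    (hc : PySem.Chars.isspace c = false) :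
    PySem.Chars.rstrip (s ++ X) = s ++ PySem.Chars.rstrip X := by
  have hne : List.dropWhile PySem.Chars.isspace X.reverse ≠ [] := by
    intro hnil
    have := List.dropWhile_eq_nil_iff.mp hnil c (by simp [hX])
    rw [hc] at this
    exact Bool.false_ne_true this
  show (List.dropWhile PySem.Chars.isspace (s ++ X).reverse).reverse
      = s ++ (List.dropWhile PySem.Chars.isspace X.reverse).reverse
  rw [List.reverse_append, List.dropWhile_append]
  rw [if_neg (by simpa using hne)]
  simp

-- join prefix/suffix shape
theorem pvJoinApp (sep : List Char) : ∀ (Bs Y : List (List Char)), Bs ≠ [] → Y ≠ [] →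
    PySem.Chars.join sep (Bs ++ Y) = PySem.Chars.join sep Bs ++ sep ++ PySem.Chars.join sep Y
  | [], _, hB, _ => absurd rfl hB
  | [b], Y, _, hY => by
      obtain ⟨y, ys, rfl⟩ := List.exists_cons_of_ne_nil hY
      rw [List.singleton_append, PySem.Chars.join_cons_cons, PySem.Chars.join_singleton]
  | b :: b' :: Bs', Y, _, hY => by
      show PySem.Chars.join sep (b :: b' :: (Bs' ++ Y))
          = PySem.Chars.join sep (b :: b' :: Bs') ++ sep ++ PySem.Chars.join sep Y
      rw [PySem.Chars.join_cons_cons sep b b' (Bs' ++ Y),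
        show b' :: (Bs' ++ Y) = (b' :: Bs') ++ Y from rfl,
        pvJoinApp sep (b' :: Bs') Y (by simp) hY,
        PySem.Chars.join_cons_cons sep b b' Bs']
      simp [List.append_assoc]

theorem pvJoinConsPrefix (sep : List Char) (x : List Char) (rest : List (List Char)) :
    ∃ r, PySem.Chars.join sep (x :: rest) = x ++ r := by
  cases rest with
  | nil => exact ⟨[], by simp [PySem.Chars.join_singleton]⟩
  | cons y ys => exact ⟨sep ++ PySem.Chars.join sep (y :: ys), by
      rw [PySem.Chars.join_cons_cons]; simp⟩

-- the join of a block of non-empty stripped lines starts and ends with non-whitespace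
theorem pvCharsStripped (b : String) (hb : PySem.Str.strip b = b) :
    PySem.Chars.strip b.toList = b.toList := by
  have := congrArg String.toList hb
  simpa [PySem.Str.toList_strip] using this

theorem pvBlockHead (B : List String) (hB : B ≠ [])
    (h : ∀ b ∈ B, b ≠ "" ∧ PySem.Str.strip b = b) :
    ∃ c t, PySem.Chars.join ['\n'] (B.map String.toList) = c :: t ∧ PySem.Chars.isspace c = false := by
  obtain ⟨b, B', rfl⟩ := List.exists_cons_of_ne_nil hB
  have hb := h b (by simp)
  have hbl : b.toList ≠ [] := by simpa using hb.1
  obtain ⟨c, t0, hct⟩ := List.exists_cons_of_ne_nil hbl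
  have hc := pvStripHead _ (pvCharsStripped b hb.2) c t0 hct
  obtain ⟨r, hr⟩ := pvJoinConsPrefix ['\n'] b.toList (B'.map String.toList)
  refine ⟨c, t0 ++ r, ?_, hc⟩
  rw [List.map_cons, hr, hct]
  simp

theorem pvBlockLast : ∀ (B : List String), B ≠ [] →
    (∀ b ∈ B, b ≠ "" ∧ PySem.Str.strip b = b) →
    ∃ s d, PySem.Chars.join ['\n'] (B.map String.toList) = s ++ [d] ∧ PySem.Chars.isspace d = false
  | [], hB, _ => absurd rfl hB
  | [b], _, h => by
      have hb := h b (by simp)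
      have hbl : b.toList ≠ [] := by simpa using hb.1
      obtain ⟨z, zs, hzs⟩ := List.exists_cons_of_ne_nil (l := b.toList.reverse) (by simpa using hbl)
      have hsplit : b.toList = zs.reverse ++ [z] := by
        simpa using congrArg List.reverse hzs
      exact ⟨zs.reverse, z, by simp [PySem.Chars.join_singleton, hsplit],
        pvStripLast _ (pvCharsStripped b hb.2) _ _ hsplit⟩
  | b :: b' :: B', _, h => by
      obtain ⟨s, d, hsd, hd⟩ := pvBlockLast (b' :: B') (by simp) (fun x hx => h x (by simp [hx]))
      refine ⟨b.toList ++ '\n' :: s, d, ?_, hd⟩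
      simp only [List.map_cons] at hsd ⊢
      rw [PySem.Chars.join_cons_cons, hsd]
      simp

-- L3: strip of a clean block join is itself
theorem pvStripBlock (B : List String) (hB : B ≠ [])
    (h : ∀ b ∈ B, b ≠ "" ∧ PySem.Str.strip b = b) :
    PySem.Chars.strip (PySem.Chars.join ['\n'] (B.map String.toList))
      = PySem.Chars.join ['\n'] (B.map String.toList) := by
  obtain ⟨c, t, he, hc⟩ := pvBlockHead B hB h
  obtain ⟨s, d, hel, hd⟩ := pvBlockLast B hB h
  show PySem.Chars.rstrip (PySem.Chars.lstrip (PySem.Chars.join ['\n'] (B.map String.toList)))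
      = PySem.Chars.join ['\n'] (B.map String.toList)
  rw [he, pvLstripHead c t hc, ← he, hel, pvRstripKeep s d hd]

-- L4: a single trailing newline is stripped
theorem pvStripBlockNl (B : List String) (hB : B ≠ [])
    (h : ∀ b ∈ B, b ≠ "" ∧ PySem.Str.strip b = b) :
    PySem.Chars.strip (PySem.Chars.join ['\n'] (B.map String.toList) ++ ['\n'])
      = PySem.Chars.join ['\n'] (B.map String.toList) := by
  obtain ⟨c, t, he, hc⟩ := pvBlockHead B hB h
  obtain ⟨s, d, hel, hd⟩ := pvBlockLast B hB h
  show PySem.Chars.rstrip (PySem.Chars.lstrip (PySem.Chars.join ['\n'] (B.map String.toList) ++ ['\n']))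
      = PySem.Chars.join ['\n'] (B.map String.toList)
  rw [he, List.cons_append, pvLstripHead c (t ++ ['\n']) hc, ← List.cons_append, ← he,
    pvRstripNl, hel, pvRstripKeep s d hd]

-- L5: strip skips over a clean block and its separator
theorem pvStripBlockSep (B : List String) (hB : B ≠ [])
    (h : ∀ b ∈ B, b ≠ "" ∧ PySem.Str.strip b = b) (X : List Char) (c : Char) (t : List Char)
    (hX : X = c :: t) (hc : PySem.Chars.isspace c = false) :
    PySem.Chars.strip (PySem.Chars.join ['\n'] (B.map String.toList) ++ '\n' :: '\n' :: X)
      = PySem.Chars.join ['\n'] (B.map String.toList) ++ '\n' :: '\n' :: PySem.Chars.strip X := by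
  obtain ⟨cb, tb, he, hcb⟩ := pvBlockHead B hB h
  have hstripX : PySem.Chars.strip X = PySem.Chars.rstrip X := by
    show PySem.Chars.rstrip (PySem.Chars.lstrip X) = PySem.Chars.rstrip X
    rw [hX, pvLstripHead c t hc]
  show PySem.Chars.rstrip (PySem.Chars.lstrip (PySem.Chars.join ['\n'] (B.map String.toList) ++ '\n' :: '\n' :: X))
      = PySem.Chars.join ['\n'] (B.map String.toList) ++ '\n' :: '\n' :: PySem.Chars.strip X
  rw [he, List.cons_append, pvLstripHead cb (tb ++ '\n' :: '\n' :: X) hcb, ← List.cons_append, ← he]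
  have hassoc : PySem.Chars.join ['\n'] (B.map String.toList) ++ '\n' :: '\n' :: X
      = (PySem.Chars.join ['\n'] (B.map String.toList) ++ ['\n', '\n']) ++ X := by simp
  rw [hassoc, pvRstripApp _ X c t hX hc, hstripX]
  simp

theorem pvParagraphs_nil : pvParagraphs [] = [] := by rw [pvParagraphs]

theorem pvParagraphs_blank (rest : List String) : pvParagraphs ("" :: rest) = pvParagraphs rest := by
  rw [pvParagraphs]
  simp

theorem pvLstripNl (z : List Char) : PySem.Chars.lstrip ('\n' :: z) = PySem.Chars.lstrip z := by
  simp [PySem.Chars.lstrip, (by decide : PySem.Chars.isspace '\n' = true)]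

theorem pvStripNlCons (z : List Char) : PySem.Chars.strip ('\n' :: z) = PySem.Chars.strip z := by
  show PySem.Chars.rstrip (PySem.Chars.lstrip ('\n' :: z)) = PySem.Chars.rstrip (PySem.Chars.lstrip z)
  rw [pvLstripNl]

theorem pvStripJoinBlankCons (Xs : List (List Char)) :
    PySem.Chars.strip (PySem.Chars.join ['\n'] ([] :: Xs))
      = PySem.Chars.strip (PySem.Chars.join ['\n'] Xs) := by
  cases Xs with
  | nil => rfl
  | cons x xs =>
      rw [PySem.Chars.join_cons_cons]
      show PySem.Chars.strip ('\n' :: PySem.Chars.join ['\n'] (x :: xs)) = _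
      rw [pvStripNlCons]

theorem pvCollapse_blank_cons (rest : List String) :
    pvCollapse none ("" :: rest) = "" :: pvCollapse none (rest.dropWhile (· == "")) := by
  show (if ("" : String) ≠ "" ∨ (none : Option String) ≠ some "" then [""] else [])
      ++ pvCollapse (some "") rest = _
  rw [pvCollapse_blank]
  simp

-- main: strip of A's collapsed join = B's paragraph join, for stripped input lines
theorem pvMain : ∀ (N : Nat) (kept : List String), kept.length ≤ N →
    (∀ l ∈ kept, PySem.Str.strip l = l) →
    PySem.Chars.strip (PySem.Chars.join ['\n'] ((pvCollapse none kept).map String.toList))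
      = PySem.Chars.join ['\n', '\n'] ((pvParagraphs kept).map String.toList) := by
  intro N
  induction N with
  | zero =>
      intro kept hlen _
      have hk : kept = [] := List.eq_nil_of_length_eq_zero (Nat.le_zero.mp hlen)
      subst hk
      rw [pvParagraphs_nil]
      rfl
  | succ N ih =>
      intro kept hlen h
      cases kept with
      | nil =>
          rw [pvParagraphs_nil]
          rfl
      | cons l rest =>
          by_cases hl : l = ""
          · subst hl
            rw [pvCollapse_blank_cons, pvParagraphs_blank, ← pvParagraphs_dropWhile rest]
            simp only [List.map_cons]
            rw [show ("" : String).toList = [] from rfl, pvStripJoinBlankCons]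
            exact ih (rest.dropWhile (· == "")) 
              (le_trans (List.length_dropWhile_le _ _) (by simpa using hlen))
              (fun x hx => h x (List.mem_cons_of_mem _ ((List.dropWhile_suffix _).subset hx)))
          · by_cases hm : "" ∈ (l :: rest)
            · obtain ⟨k, hk⟩ := Option.isSome_iff_exists.mp
                ((PySem.List.index?_isSome_iff (l :: rest) "").mpr hm)
              obtain ⟨pre, suf, hsplit, hklen, hnotin⟩ :=
                (PySem.List.index?_eq_some_iff (l :: rest) "" k).mp hk
              have hpre_ne : pre ≠ [] := by
                intro h0
                rw [h0] at hsplit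
                simp at hsplit
                exact hl hsplit.1
              have hblock : ∀ x ∈ pre, x ≠ "" ∧ PySem.Str.strip x = x := fun x hx =>
                ⟨fun he => hnotin (he ▸ hx),
                  h x (by rw [hsplit]; exact List.mem_append_left _ hx)⟩
              have hpar : pvParagraphs (l :: rest)
                  = PySem.Str.join "\n" pre :: pvParagraphs ("" :: suf) := by
                rw [pvParagraphs]
                rw [dif_neg hl]
                rw [if_pos hm, hk]
                show PySem.Str.join "\n" (List.take k (l :: rest))
                    :: pvParagraphs (List.drop k (l :: rest)) = _
                rw [hsplit, List.take_left' hklen, List.drop_left' hklen]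
              have hcol : pvCollapse none (l :: rest)
                  = pre ++ "" :: pvCollapse none (suf.dropWhile (· == "")) := by
                rw [hsplit, pvCollapse_block pre _ (fun x hx => (hblock x hx).1),
                  pvCollapse_blank_cons]
              have hsuflen : suf.length + 1 ≤ N + 1 := by
                have h2 := congrArg List.length hsplit
                simp only [List.length_cons, List.length_append] at h2
                simp only [List.length_cons] at hlen
                have hp1 : 1 ≤ pre.length := by
                  cases pre with
                  | nil => exact absurd rfl hpre_ne
                  | cons _ _ => simp
                omega
              cases hs' : suf.dropWhile (· == "") with
              | nil =>
                  rw [hcol, hs']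
                  show PySem.Chars.strip (PySem.Chars.join ['\n']
                    ((pre ++ [""]).map String.toList)) = _
                  rw [List.map_append]
                  rw [pvJoinApp ['\n'] (pre.map String.toList) ([""].map String.toList)
                    (by simpa using hpre_ne) (by simp)]
                  rw [show ([""] : List String).map String.toList = [[]] from rfl,
                    PySem.Chars.join_singleton, List.append_nil, pvStripBlockNl pre hpre_ne hblock]
                  rw [hpar, pvParagraphs_blank, ← pvParagraphs_dropWhile suf, hs', pvParagraphs_nil]
                  rw [show (PySem.Str.join "\n" pre :: ([] : List String)).map String.toList
                      = [(PySem.Str.join "\n" pre).toList] from rfl,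
                    PySem.Chars.join_singleton, PySem.Str.toList_join]
                  rfl
              | cons d t' =>
                  have hd : d ≠ "" := by
                    have := pvDropWhileHead (· == "") suf d t' hs'
                    simpa using this
                  have hdmem : d ∈ suf := (List.dropWhile_suffix (· == "")).subset
                    (by rw [hs']; simp)
                  have hdstr : PySem.Str.strip d = d :=
                    h d (by rw [hsplit]; exact List.mem_append_right _ (by simp [hdmem]))
                  have hdl : d.toList ≠ [] := by simpa using hd
                  obtain ⟨c, t0, hct⟩ := List.exists_cons_of_ne_nil hdl
                  have hc : PySem.Chars.isspace c = false :=
                    pvStripHead _ (pvCharsStripped d hdstr) c t0 hct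
                  have hcold : pvCollapse none (d :: t') = d :: pvCollapse (some d) t' := by
                    show (if d ≠ "" ∨ (none : Option String) ≠ some "" then [d] else [])
                        ++ pvCollapse (some d) t' = _
                    simp [hd]
                  obtain ⟨r, hr⟩ := pvJoinConsPrefix ['\n'] d.toList
                    ((pvCollapse (some d) t').map String.toList)
                  have hXne : PySem.Chars.join ['\n'] ((pvCollapse none (d :: t')).map String.toList)
                      = c :: (t0 ++ r) := by
                    rw [hcold]
                    simp only [List.map_cons]
                    rw [hr, hct]
                    simp
                  rw [hcol, hs']
                  rw [List.map_append]
                  rw [pvJoinApp ['\n'] (pre.map String.toList)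
                    (("" :: pvCollapse none (d :: t')).map String.toList)
                    (by simpa using hpre_ne) (by simp)]
                  rw [show ("" :: pvCollapse none (d :: t')).map String.toList
                      = [] :: (pvCollapse none (d :: t')).map String.toList from rfl]
                  rw [hcold]
                  simp only [List.map_cons]
                  rw [PySem.Chars.join_cons_cons]
                  have hshape : PySem.Chars.join ['\n'] (pre.map String.toList) ++ ['\n']
                        ++ ([] ++ ['\n'] ++ PySem.Chars.join ['\n']
                          (d.toList :: (pvCollapse (some d) t').map String.toList))
                      = PySem.Chars.join ['\n'] (pre.map String.toList) ++ '\n' :: '\n' ::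
                        PySem.Chars.join ['\n'] (d.toList :: (pvCollapse (some d) t').map String.toList) := by
                    simp
                  rw [hshape]
                  have hXeq : PySem.Chars.join ['\n'] (d.toList :: (pvCollapse (some d) t').map String.toList)
                      = c :: (t0 ++ r) := by
                    rw [← hXne, hcold]
                    simp only [List.map_cons]
                  rw [pvStripBlockSep pre hpre_ne hblock _ c (t0 ++ r) hXeq hc]
                  have hih := ih (d :: t') (by
                    have := List.length_dropWhile_le (· == "") suf
                    rw [hs'] at this
                    simp only [List.length_cons] at this ⊢
                    omega)
                    (fun x hx => h x (by
                      rw [hsplit]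
                      refine List.mem_append_right _ (List.mem_cons_of_mem _ ?_)
                      exact (List.dropWhile_suffix (· == "")).subset (by rw [hs']; exact hx)))
                  rw [hcold] at hih
                  simp only [List.map_cons] at hih
                  rw [hih]
                  -- right-hand side
                  rw [hpar, pvParagraphs_blank, ← pvParagraphs_dropWhile suf, hs']
                  have hpar2 : pvParagraphs (d :: t') ≠ [] := by
                    rw [pvParagraphs, dif_neg hd]
                    simp
                  obtain ⟨q, ps, hqps⟩ := List.exists_cons_of_ne_nil hpar2
                  rw [hqps]
                  simp only [List.map_cons]
                  rw [PySem.Chars.join_cons_cons, PySem.Str.toList_join]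
                  rw [show ("\n" : String).toList = ['\n'] from rfl]
                  simp
            · have hb : ∀ x ∈ (l :: rest), x ≠ "" := fun x hx he => hm (he ▸ hx)
              have hcol : pvCollapse none (l :: rest) = (l :: rest) := by
                have h2 := pvCollapse_block (l :: rest) [] hb
                simpa [pvCollapse] using h2
              have hpar : pvParagraphs (l :: rest) = [PySem.Str.join "\n" (l :: rest)] := by
                rw [pvParagraphs]
                rw [dif_neg hl]
                rw [if_neg hm]
                show PySem.Str.join "\n" (List.take (l :: rest).length (l :: rest))
                    :: pvParagraphs (List.drop (l :: rest).length (l :: rest)) = _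
                rw [List.take_length, List.drop_length, pvParagraphs_nil]
              rw [hcol, hpar, pvStripBlock (l :: rest) (by simp) (fun x hx => ⟨hb x hx, h x hx⟩)]
              rw [show ([PySem.Str.join "\n" (l :: rest)]).map String.toList
                  = [(PySem.Str.join "\n" (l :: rest)).toList] from rfl,
                PySem.Chars.join_singleton, PySem.Str.toList_join]
              rfl

-- ===== VERDICT (by name: the statement is the Claim_ definition above) =====
theorem compact_lua_body_spec : Claim_equal_compact_lua_body := by
  intro body _
  unfold Spec_compact_lua_body compact_lua_body compact_lua_body_alt
  rw [pvFoldA]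
  rw [show (false : Bool) = ((none : Option String) == some "") from rfl]
  show PySem.Str.strip (PySem.Str.join "\n"
      ((((PySem.Str.splitlines body).map PySem.Str.strip).filter
          (fun s => !(PySem.Str.startswith s "--"))).foldl pvStep
        ([], (none : Option String) == some "")).1) ++ "\n"
    = PySem.Str.join "\n\n" (pvParagraphs
        (((PySem.Str.splitlines body).map PySem.Str.strip).filter
          (fun s => !(PySem.Str.startswith s "--")))) ++ "\n"
  rw [pvFoldCollapse _ [] none]
  have hkept : ∀ l ∈ ((PySem.Str.splitlines body).map PySem.Str.strip).filter
      (fun s => !(PySem.Str.startswith s "--")), PySem.Str.strip l = l := by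
    intro l hl
    obtain ⟨x, _, rfl⟩ := List.mem_map.mp (List.mem_of_mem_filter hl)
    exact pvStrStripIdem x
  set kept := ((PySem.Str.splitlines body).map PySem.Str.strip).filter
    (fun s => !(PySem.Str.startswith s "--")) with hkdef
  have hmain := pvMain kept.length kept le_rfl hkept
  have hstr : PySem.Str.strip (PySem.Str.join "\n" (pvCollapse none kept))
      = PySem.Str.join "\n\n" (pvParagraphs kept) := by
    apply String.toList_inj.mp
    rw [PySem.Str.toList_strip, PySem.Str.toList_join, PySem.Str.toList_join]
    rw [show ("\n" : String).toList = ['\n'] from rfl,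
      show ("\n\n" : String).toList = ['\n', '\n'] from rfl]
    exact hmain
  simp only [List.nil_append]
  rw [hstr]
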